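-- pv_equiv track=rewrite | github.com/raeez/chiral-bar-cobar | compute/lib/pbw_holonomy.py | molien_weyl_invariants
-- ===== SOURCE A (Python) =====
-- from typing import Dict, List, Tuple
--
-- def molien_weyl_invariants(lie_type: str, rank: int,
--                            p_max: int = 20) -> List[int]:
--     """dim(Sym^p(g))^g for p = 0, 1, ..., p_max.
--
--     Uses the Chevalley theorem: the invariant ring is polynomial
--     in r generators of degrees d_1, ..., d_r.
--     """
--     if lie_type == "A" and rank == 1:
--         # sl₂: degree 2
--         degrees = [2]
--     elif lie_type == "A" and rank == 2:
--         # sl₃: degrees 2, 3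
--         degrees = [2, 3]
--     elif lie_type == "A":
--         # sl_{r+1}: degrees 2, 3, ..., r+1
--         degrees = list(range(2, rank + 2))
--     else:
--         raise ValueError(f"Unsupported type {lie_type}{rank}")
--
--     # dim(Sym^p(g))^g = number of partitions of p into parts from degrees
--     # (with repetition)
--     dims = [0] * (p_max + 1)
--     dims[0] = 1
--     for d in degrees:
--         new_dims = list(dims)
--         for p in range(d, p_max + 1):
--             new_dims[p] += new_dims[p - d]
--         dims = new_dims
--
--     return dims
-- ===== SOURCE B (Python) =====
-- def molien_weyl_invariants(lie_type: str, rank: int, p_max: int = 20):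
--     """dim(Sym^p(g))^g for p = 0..p_max, via the prefix-count recurrence
--     count(i, p) = count(i-1, p) + count(i, p - degrees[i]) (count over the
--     first i+1 degrees), evaluated p-major: one sweep over p building the
--     column of all prefix counts, keeping only the last max-degree columns."""
--     if lie_type == "A" and rank == 1:
--         degrees = [2]
--     elif lie_type == "A" and rank == 2:
--         degrees = [2, 3]
--     elif lie_type == "A":
--         degrees = list(range(2, rank + 2))
--     else:
--         raise ValueError(f"Unsupported type {lie_type}{rank}")
--
--     w = max(degrees, default=1)  # columns older than this are never read again
--     result = []
--     recent = []  # recent[-k] = column of prefix counts for p - k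
--     for p in range(p_max + 1):
--         col = []
--         c = 1 if p == 0 else 0  # count using no degrees at all
--         for i, d in enumerate(degrees):
--             if d <= p:
--                 c += recent[-d][i]
--             col.append(c)
--         result.append(c)
--         recent.append(col)
--         if len(recent) > w:
--             del recent[0]
--     return result
-- ===== Notes on version B (the rewrite author's own statement) =====
-- stated objective: alternative
-- what changed: Replaces A's degree-major in-place array DP (one pass per degree doing new_dims[p] += new_dims[p-d]) by a p-major single sweep of the prefix-count recurrence count(i,p) = count(i-1,p) + count(i,p-degrees[i]), building one column of all prefix counts per p and keeping only a sliding window of the last max-degree columns.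
import Mathlib
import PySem

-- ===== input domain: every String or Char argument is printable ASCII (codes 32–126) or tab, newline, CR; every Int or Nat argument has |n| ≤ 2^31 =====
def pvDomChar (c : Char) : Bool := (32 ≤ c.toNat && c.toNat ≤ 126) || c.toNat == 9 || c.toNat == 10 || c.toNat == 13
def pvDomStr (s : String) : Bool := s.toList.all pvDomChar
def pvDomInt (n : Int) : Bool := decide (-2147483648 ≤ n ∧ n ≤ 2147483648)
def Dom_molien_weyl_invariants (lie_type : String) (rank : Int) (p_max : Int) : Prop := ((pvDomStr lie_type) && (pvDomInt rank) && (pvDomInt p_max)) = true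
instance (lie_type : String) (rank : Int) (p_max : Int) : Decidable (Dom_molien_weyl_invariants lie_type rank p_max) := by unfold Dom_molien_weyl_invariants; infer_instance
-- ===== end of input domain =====

-- B replaces A's degree-major in-place array updates by a p-major sweep of the
-- prefix-count recurrence count(i,p) = count(i-1,p) + count(i,p-degrees[i]),
-- building one column of prefix counts per p and keeping only a sliding window
-- of the last max-degree columns; same values, same asymptotic cost.

-- ===== PORT A =====
def molien_weyl_invariants (lie_type : String) (rank : Int) (p_max : Int) : List Int :=
  let degrees : List Int :=
    if lie_type == "A" && rank == 1 then [2]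
    else if lie_type == "A" && rank == 2 then [2, 3]
    else if lie_type == "A" then PySem.List.pyRange 2 (rank + 2) 1
    else []  -- Python raises ValueError here; excluded by Pre_
  -- dims = [0] * (p_max + 1); dims[0] = 1  (Python raises IndexError when p_max < 0; excluded by Pre_)
  let dims := PySem.List.pySetD (List.replicate (p_max + 1).toNat (0 : Int)) 0 1
  degrees.foldl
    (fun dims d =>
      (PySem.List.pyRange d (p_max + 1) 1).foldl
        (fun nd p =>
          PySem.List.pySetD nd p (PySem.List.pyGetD nd p 0 + PySem.List.pyGetD nd (p - d) 0))
        dims)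
    dims

-- ===== PORT B =====
-- (the pyGetD defaults are never used: the guard d ≤ p and the window size keep every access in range)
def molien_weyl_invariants_alt (lie_type : String) (rank : Int) (p_max : Int) : List Int :=
  let degrees : List Int :=
    if lie_type == "A" && rank == 1 then [2]
    else if lie_type == "A" && rank == 2 then [2, 3]
    else if lie_type == "A" then PySem.List.pyRange 2 (rank + 2) 1
    else []  -- Python raises ValueError here; excluded by Pre_
  let w : Int := PySem.List.maxD degrees (fun x => x) 1
  -- the `for i, d in enumerate(degrees)` loop is a fold over degrees carrying the index i;
  -- col is accumulated head-first and reversed (Lean's transcription of list.append in a loop)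
  ((PySem.List.pyRange 0 (p_max + 1) 1).foldl
    (fun (st : List Int × List (List Int)) p =>
      let cc := degrees.foldl
        (fun (s : Int × Int × List Int) d =>
          let c : Int :=
            if d ≤ p
            then s.2.1 + PySem.List.pyGetD (PySem.List.pyGetD st.2 (-d) []) s.1 0
            else s.2.1
          (s.1 + 1, c, c :: s.2.2))
        ((0 : Int), (if p = 0 then (1 : Int) else 0), [])
      let recent := st.2 ++ [cc.2.2.reverse]
      (st.1 ++ [cc.2.1], if w < (recent.length : Int) then recent.drop 1 else recent))
    (([], []) : List Int × List (List Int))).1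

-- ===== PRECONDITION & SPEC =====
-- Pre_ excludes lie_type ≠ "A" (Python A raises ValueError) and p_max < 0 (Python A raises IndexError).
def Pre_molien_weyl_invariants (lie_type : String) (rank : Int) (p_max : Int) : Prop :=
  lie_type = "A" ∧ 0 ≤ p_max
instance (lie_type : String) (rank : Int) (p_max : Int) : Decidable (Pre_molien_weyl_invariants lie_type rank p_max) := by unfold Pre_molien_weyl_invariants; infer_instance

def pvWitness_molien_weyl_invariants : String × Int × Int := ("A", 3, 6)

def Spec_molien_weyl_invariants (lie_type : String) (rank : Int) (p_max : Int) (out : List Int) : Prop := out = molien_weyl_invariants_alt lie_type rank p_max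
instance (lie_type : String) (rank : Int) (p_max : Int) (out : List Int) : Decidable (Spec_molien_weyl_invariants lie_type rank p_max out) := by unfold Spec_molien_weyl_invariants; infer_instance

-- ===== CLAIM (what is proved, stated in full; the proofs are below) =====
def Claim_equal_molien_weyl_invariants : Prop := ∀ (lie_type : String) (rank : Int) (p_max : Int), Dom_molien_weyl_invariants lie_type rank p_max → Pre_molien_weyl_invariants lie_type rank p_max → Spec_molien_weyl_invariants lie_type rank p_max (molien_weyl_invariants lie_type rank p_max)

-- ===== LEMMAS AND PROOFS =====

-- reference function A-side: partition-count recurrence for one degree d over base coefficients `old`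
def pvS (old : List Int) (d : Nat) : Nat → Int
  | 0 => old.getD 0 0
  | (q + 1) => old.getD (q + 1) 0 + (if _h : 1 ≤ d ∧ d ≤ q + 1 then pvS old d (q + 1 - d) else 0)
  decreasing_by omega

lemma pvS_of_lt (old : List Int) (d q : Nat) (h : q < d) : pvS old d q = old.getD q 0 := by
  cases q with
  | zero => simp [pvS]
  | succ q => simp [pvS]; omega

lemma pvS_rec (old : List Int) (d q : Nat) (h1 : 1 ≤ d) (h2 : d ≤ q) :
    pvS old d q = old.getD q 0 + pvS old d (q - d) := by
  obtain ⟨q', rfl⟩ : ∃ q', q = q' + 1 := ⟨q - 1, by omega⟩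
  rw [pvS]
  simp [h1, h2]

-- reference function B-side: prefix counts, cnt over the first i degrees
def pvCnt (ds : List Int) : Nat → Nat → Int
  | 0, p => if p = 0 then 1 else 0
  | (i+1), p =>
      pvCnt ds i p +
        (if _h : 0 < ds.getD i 0 ∧ ds.getD i 0 ≤ (p : Int)
         then pvCnt ds (i+1) (p - (ds.getD i 0).toNat) else 0)
  termination_by i p => (i, p)
  decreasing_by
    · exact Prod.Lex.left _ _ (by omega)
    · exact Prod.Lex.right _ (by omega)

lemma pvCnt_zero (ds : List Int) (p : Nat) : pvCnt ds 0 p = if p = 0 then 1 else 0 := by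
  rw [pvCnt]

lemma pvCnt_succ (ds : List Int) (i p : Nat) (d : Int) (hd : ds.getD i 0 = d) (h2 : 2 ≤ d) :
    pvCnt ds (i+1) p
      = pvCnt ds i p + (if d ≤ (p : Int) then pvCnt ds (i+1) (p - d.toNat) else 0) := by
  conv_lhs => rw [pvCnt]
  rw [hd]
  by_cases hc : d ≤ (p : Int)
  · rw [dif_pos ⟨by omega, hc⟩, if_pos hc]
  · rw [dif_neg (by omega), if_neg hc]

-- cnt over the first i degrees ignores degrees appended on the right
lemma pvCnt_prefix (ds es : List Int) : ∀ (i : Nat), i ≤ ds.length →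
    ∀ p, pvCnt (ds ++ es) i p = pvCnt ds i p := by
  intro i
  induction i with
  | zero => intro _ p; rw [pvCnt_zero, pvCnt_zero]
  | succ i ih =>
    intro hi
    have hgd : (ds ++ es).getD i 0 = ds.getD i 0 := List.getD_append ds es 0 i (by omega)
    intro p
    induction p using Nat.strong_induction_on with
    | _ p ihp =>
      conv_lhs => rw [pvCnt]
      conv_rhs => rw [pvCnt]
      rw [hgd, ih (by omega) p]
      by_cases hc : 0 < ds.getD i 0 ∧ ds.getD i 0 ≤ (p : Int)
      · rw [dif_pos hc, dif_pos hc, ihp _ (by omega)]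
      · rw [dif_neg hc, dif_neg hc]

-- one A-pass on coefficients of cnt at level j produces cnt at level j+1
lemma pvS_cnt (ds : List Int) (j N : Nat) (L : List Int) (d : Int)
    (hd : ds.getD j 0 = d) (h2 : 2 ≤ d)
    (hL : ∀ q, q < N → L.getD q 0 = pvCnt ds j q) :
    ∀ p, p < N → pvS L d.toNat p = pvCnt ds (j+1) p := by
  intro p
  induction p using Nat.strong_induction_on with
  | _ p ihp =>
    intro hp
    rw [pvCnt_succ ds j p d hd h2]
    by_cases hc : d.toNat ≤ p
    · rw [pvS_rec L d.toNat p (by omega) hc, hL p hp, ihp (p - d.toNat) (by omega) (by omega),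
        if_pos (by omega)]
    · rw [pvS_of_lt L d.toNat p (by omega), hL p hp, if_neg (by omega)]
      ring

-- ===== A-side: the existing in-place pass characterisation =====
lemma stepA_inv (l : List Int) (d : Int) (hd : 2 ≤ d) (j : Nat)
    (hlen : d + (j : Int) ≤ (l.length : Int)) :
    ((PySem.List.pyRange d (d + (j : Int)) 1).foldl
        (fun nd p =>
          PySem.List.pySetD nd p (PySem.List.pyGetD nd p 0 + PySem.List.pyGetD nd (p - d) 0)) l).length = l.length ∧
    ∀ q : Nat, ((PySem.List.pyRange d (d + (j : Int)) 1).foldl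
        (fun nd p =>
          PySem.List.pySetD nd p (PySem.List.pyGetD nd p 0 + PySem.List.pyGetD nd (p - d) 0)) l).getD q 0
      = if (q : Int) < d + (j : Int) then pvS l d.toNat q else l.getD q 0 := by
  induction j with
  | zero =>
    rw [show d + ((0 : Nat) : Int) = d by push_cast; ring, PySem.List.pyRange_one_eq_nil le_rfl]
    refine ⟨rfl, fun q => ?_⟩
    simp only [List.foldl_nil]
    by_cases hq : (q : Int) < d
    · rw [if_pos hq, pvS_of_lt]
      omega
    · rw [if_neg hq]
  | succ j ih =>
    obtain ⟨ihlen, ihget⟩ := ih (by push_cast at hlen ⊢; omega)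
    rw [show d + ((j + 1 : Nat) : Int) = (d + (j : Int)) + 1 by push_cast; ring,
      PySem.List.pyRange_one_succ_right (by omega), List.foldl_append]
    simp only [List.foldl_cons, List.foldl_nil]
    set r := (PySem.List.pyRange d (d + (j : Int)) 1).foldl
        (fun nd p =>
          PySem.List.pySetD nd p (PySem.List.pyGetD nd p 0 + PySem.List.pyGetD nd (p - d) 0)) l with hr
    have hcast : d + (j : Int) = ((d.toNat + j : Nat) : Int) := by push_cast; omega
    have hsub : ((d.toNat + j : Nat) : Int) - d = ((j : Nat) : Int) := by push_cast; omega
    rw [hcast]; rw [hsub, PySem.List.pySetD_natCast, PySem.List.pyGetD_natCast, PySem.List.pyGetD_natCast]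
    have hvlt : (d.toNat + j) < l.length := by omega
    have hval : r.getD (d.toNat + j) 0 + r.getD j 0 = pvS l d.toNat (d.toNat + j) := by
      rw [ihget, ihget]
      rw [if_neg (by omega), if_pos (by omega)]
      rw [pvS_rec l d.toNat (d.toNat + j) (by omega) (by omega)]
      simp
    constructor
    · simp [ihlen]
    · intro q
      by_cases hq : q = d.toNat + j
      · subst hq
        rw [List.getD_eq_getElem?_getD, List.getElem?_set_self (by omega), Option.getD_some, hval,
          if_pos (by push_cast; omega)]
      · rw [List.getD_eq_getElem?_getD, List.getElem?_set_ne (by omega), ← List.getD_eq_getElem?_getD,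
          ihget]
        by_cases hlt : (q : Int) < d + (j : Int)
        · rw [if_pos hlt, if_pos (by push_cast at hlt ⊢; omega)]
        · rw [if_neg hlt, if_neg (by push_cast at hlt ⊢; omega)]

lemma stepA_eq_map (l : List Int) (d pm : Int) (hd : 2 ≤ d) (hpm : 0 ≤ pm)
    (hlen : l.length = (pm + 1).toNat) :
    (PySem.List.pyRange d (pm + 1) 1).foldl
        (fun nd p =>
          PySem.List.pySetD nd p (PySem.List.pyGetD nd p 0 + PySem.List.pyGetD nd (p - d) 0)) l
    = (List.range (pm + 1).toNat).map (fun q => pvS l d.toNat q) := by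
  by_cases hc : d ≤ pm + 1
  · obtain ⟨hl, hg⟩ := stepA_inv l d hd (pm + 1 - d).toNat
      (by omega)
    rw [show d + ((pm + 1 - d).toNat : Int) = pm + 1 by omega] at hl hg
    apply List.ext_getElem
    · simp [hl, hlen]
    · intro i h1 h2
      have := hg i
      rw [if_pos (by simp at h2; omega)] at this
      rw [← List.getD_eq_getElem (d := 0), this]
      simp
  · rw [PySem.List.pyRange_one_eq_nil (by omega)]
    simp only [List.foldl_nil]
    apply List.ext_getElem
    · simp [hlen]
    · intro i h1 h2
      rw [List.getElem_map, List.getElem_range, pvS_of_lt _ _ _ (by omega),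
        List.getD_eq_getElem _ _ h1]

lemma init_eq (pm : Int) (hpm : 0 ≤ pm) :
    PySem.List.pySetD (List.replicate (pm + 1).toNat (0 : Int)) 0 1
    = (List.range (pm + 1).toNat).map (fun p => if p = 0 then (1 : Int) else 0) := by
  rw [PySem.List.pySetD_of_nonneg]
  case h => exact le_rfl
  simp only [Int.toNat_zero]
  apply List.ext_getElem
  · simp
  · intro i h1 h2
    simp only [List.getElem_map, List.getElem_range]
    by_cases hi : i = 0
    · subst hi
      simp
    · rw [List.getElem_set_ne (by omega)]
      simp [hi]

-- A's whole fold computes the map of top-level prefix counts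
lemma foldA (pm : Int) (hpm : 0 ≤ pm) (ds : List Int) (hds : ∀ d ∈ ds, 2 ≤ d) :
    ds.foldl
      (fun dims d =>
        (PySem.List.pyRange d (pm + 1) 1).foldl
          (fun nd p =>
            PySem.List.pySetD nd p (PySem.List.pyGetD nd p 0 + PySem.List.pyGetD nd (p - d) 0))
          dims)
      ((List.range (pm + 1).toNat).map (fun p => if p = 0 then (1 : Int) else 0))
    = (List.range (pm + 1).toNat).map (fun p => pvCnt ds ds.length p) := by
  induction ds using List.reverseRecOn with
  | nil =>
    simp only [List.foldl_nil]
    apply List.map_congr_left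
    intro p _
    simp only [List.length_nil]
    rw [pvCnt_zero]
  | append_singleton ds d ih =>
    have hd : 2 ≤ d := hds d (by simp)
    rw [List.foldl_append, ih (fun x hx => hds x (by simp [hx]))]
    simp only [List.foldl_cons, List.foldl_nil]
    rw [stepA_eq_map _ d pm hd hpm (by simp)]
    apply List.map_congr_left
    intro p hp
    simp only [List.mem_range] at hp
    have hdj : (ds ++ [d]).getD ds.length 0 = d := by
      rw [List.getD_eq_getElem?_getD, List.getElem?_concat_length, Option.getD_some]
    have hL : ∀ q, q < (pm + 1).toNat →
        ((List.range (pm + 1).toNat).map (fun p => pvCnt ds ds.length p)).getD q 0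
          = pvCnt (ds ++ [d]) ds.length q := by
      intro q hq
      rw [PySem.List.getD_map_range _ _ _ _ hq, pvCnt_prefix ds [d] ds.length le_rfl]
    rw [pvS_cnt (ds ++ [d]) ds.length (pm + 1).toNat _ d hdj hd hL p hp]
    simp

-- ===== B-side =====

-- the inner fold over the degrees builds the column of prefix counts (head-first)
lemma innerB (ds : List Int) (hds : ∀ d ∈ ds, 2 ≤ d) (P : Nat) (recent : List (List Int))
    (hacc : ∀ (i : Nat), i < ds.length → (ds.getD i 0) ≤ (P : Int) →
      PySem.List.pyGetD (PySem.List.pyGetD recent (-(ds.getD i 0)) []) (i : Int) 0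
        = pvCnt ds (i+1) (P - (ds.getD i 0).toNat)) :
    ∀ (suf : List Int) (j : Nat), suf = ds.drop j → j ≤ ds.length →
    suf.foldl
        (fun (s : Int × Int × List Int) d =>
          let c : Int :=
            if d ≤ (P : Int)
            then s.2.1 + PySem.List.pyGetD (PySem.List.pyGetD recent (-d) []) s.1 0
            else s.2.1
          (s.1 + 1, c, c :: s.2.2))
        ((j : Int), pvCnt ds j P, ((List.range j).map (fun t => pvCnt ds (t+1) P)).reverse)
      = ((ds.length : Int), pvCnt ds ds.length P,
         ((List.range ds.length).map (fun t => pvCnt ds (t+1) P)).reverse) := by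
  intro suf
  induction suf with
  | nil =>
    intro j hdrop hj
    have hjlen : j = ds.length := by
      by_contra hne
      have hlt : j < ds.length := by omega
      have h0 := List.getElem_cons_drop (as := ds) (h := hlt)
      rw [← hdrop] at h0
      simp at h0
      omega
    subst hjlen
    simp
  | cons d rest ih =>
    intro j hdrop hj
    have hjlt : j < ds.length := by
      by_contra hc
      rw [List.drop_eq_nil_of_le (by omega : ds.length ≤ j)] at hdrop
      simp at hdrop
    have h2 : d :: rest = ds[j] :: ds.drop (j + 1) :=
      hdrop.trans (List.getElem_cons_drop (as := ds) (h := hjlt)).symm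
    obtain ⟨hdj, hrest⟩ := List.cons_eq_cons.mp h2
    have hd : ds.getD j 0 = d := by
      rw [List.getD_eq_getElem ds 0 hjlt, hdj]
    have hd2 : 2 ≤ d := hds d (by rw [hdj]; exact List.getElem_mem hjlt)
    rw [List.foldl_cons]
    have hcval : (if d ≤ (P : Int)
        then pvCnt ds j P + PySem.List.pyGetD (PySem.List.pyGetD recent (-d) []) (j : Int) 0
        else pvCnt ds j P) = pvCnt ds (j+1) P := by
      rw [pvCnt_succ ds j P d hd hd2]
      by_cases hc : d ≤ (P : Int)
      · rw [if_pos hc, if_pos hc]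
        have := hacc j hjlt (hd ▸ hc)
        rw [hd] at this
        rw [this]
      · rw [if_neg hc, if_neg hc]
        ring
    simp only []
    rw [hcval]
    have hcol : pvCnt ds (j+1) P :: ((List.range j).map (fun t => pvCnt ds (t+1) P)).reverse
        = ((List.range (j+1)).map (fun t => pvCnt ds (t+1) P)).reverse := by
      rw [List.range_succ, List.map_append, List.reverse_append]
      rfl
    rw [hcol, show (j : Int) + 1 = ((j + 1 : Nat) : Int) by push_cast; ring]
    exact ih (j + 1) hrest (by omega)

-- the whole sweep: result entries and the sliding window of recent columns
lemma sweepB (ds : List Int) (hds : ∀ d ∈ ds, 2 ≤ d) (w : Int) (hw1 : 1 ≤ w)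
    (hwmax : ∀ d ∈ ds, d ≤ w) :
    ∀ (P : Nat),
    ((PySem.List.pyRange 0 (P : Int) 1).foldl
      (fun (st : List Int × List (List Int)) p =>
        let cc := ds.foldl
          (fun (s : Int × Int × List Int) d =>
            let c : Int :=
              if d ≤ p
              then s.2.1 + PySem.List.pyGetD (PySem.List.pyGetD st.2 (-d) []) s.1 0
              else s.2.1
            (s.1 + 1, c, c :: s.2.2))
          ((0 : Int), (if p = 0 then (1 : Int) else 0), [])
        let recent := st.2 ++ [cc.2.2.reverse]
        (st.1 ++ [cc.2.1], if w < (recent.length : Int) then recent.drop 1 else recent))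
      (([], []) : List Int × List (List Int)))
    = ((List.range P).map (fun p => pvCnt ds ds.length p),
       (List.range (min P w.toNat)).map
         (fun t => (List.range ds.length).map
           (fun i => pvCnt ds (i+1) (P - min P w.toNat + t)))) := by
  intro P
  induction P with
  | zero =>
    rw [show ((0 : Nat) : Int) = 0 by rfl, PySem.List.pyRange_one_eq_nil le_rfl]
    simp
  | succ P ih =>
    rw [show ((P + 1 : Nat) : Int) = (P : Int) + 1 by push_cast; ring,
      PySem.List.pyRange_one_succ_right (by omega), List.foldl_append, ih]
    simp only [List.foldl_cons, List.foldl_nil]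
    set k := min P w.toNat with hk
    set recent0 := (List.range k).map
      (fun t => (List.range ds.length).map (fun i => pvCnt ds (i+1) (P - k + t))) with hrec0
    -- the inner fold at p = P
    have hacc : ∀ (i : Nat), i < ds.length → (ds.getD i 0) ≤ (P : Int) →
        PySem.List.pyGetD (PySem.List.pyGetD recent0 (-(ds.getD i 0)) []) (i : Int) 0
          = pvCnt ds (i+1) (P - (ds.getD i 0).toNat) := by
      intro i hi hle
      have hmem : ds.getD i 0 ∈ ds := by
        rw [List.getD_eq_getElem ds 0 hi]
        exact List.getElem_mem hi
      have hd2 : 2 ≤ ds.getD i 0 := hds _ hmem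
      have hdw : ds.getD i 0 ≤ w := hwmax _ hmem
      set d := ds.getD i 0 with hdd
      have hdk : d.toNat ≤ k := by omega
      have hcast : -d = -((d.toNat : Nat) : Int) := by omega
      rw [hcast, PySem.List.pyGetD_neg_natCast recent0 d.toNat [] (by omega)
        (by rw [hrec0]; simp; omega)]
      have hlenr : recent0.length = k := by rw [hrec0]; simp
      simp only [hlenr]
      simp only [hrec0, List.getElem_map, List.getElem_range]
      have hidx : P - k + (k - d.toNat) = P - d.toNat := by omega
      rw [hidx, show (i : Int) = ((i : Nat) : Int) by rfl, PySem.List.pyGetD_natCast,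
        PySem.List.getD_map_range _ _ _ _ hi]
    have hinner := innerB ds hds P recent0 hacc ds (0 : Nat) (by simp) (by omega)
    simp only [Nat.cast_eq_zero]
    rw [show ((0 : Nat) : Int) = 0 by rfl] at hinner
    rw [pvCnt_zero ds P] at hinner
    simp only [List.range_zero, List.map_nil, List.reverse_nil] at hinner
    rw [hinner]
    rw [List.reverse_reverse, Prod.mk.injEq]
    constructor
    · rw [List.range_succ, List.map_append]
      rfl
    · -- the window update
      have hrecapp : recent0 ++ [(List.range ds.length).map (fun i => pvCnt ds (i+1) P)]
          = (List.range (k+1)).map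
              (fun t => (List.range ds.length).map (fun i => pvCnt ds (i+1) (P - k + t))) := by
        rw [List.range_succ, List.map_append]
        rw [hrec0]
        congr 1
        simp only [List.map_cons, List.map_nil]
        congr 2
        funext i
        congr 1
        omega
      rw [hrecapp]
      have hlenk : (((List.range (k+1)).map
          (fun t => (List.range ds.length).map (fun i => pvCnt ds (i+1) (P - k + t)))).length : Int)
          = (k : Int) + 1 := by simp
      by_cases hcase : w < (k : Int) + 1
      · -- k = w.toNat; window slides
        have hkw : k = w.toNat := by omega
        rw [if_pos (by rw [hlenk]; exact hcase)]
        have hmin : min (P + 1) w.toNat = k := by omega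
        rw [hmin, List.range_succ_eq_map, List.map_cons, List.drop_one, List.tail_cons, List.map_map]
        apply List.map_congr_left
        intro t _
        simp only [Function.comp_apply, Nat.succ_eq_add_one]
        congr 1
        funext i
        congr 1
        omega
      · -- window grows
        rw [if_neg (by rw [hlenk]; exact hcase)]
        have hmin : min (P + 1) w.toNat = k + 1 := by omega
        rw [hmin]
        apply List.map_congr_left
        intro t _
        congr 1
        funext i
        congr 1
        omega

-- ===== VERDICT (by name: the statement is the Claim_ definition above) =====
theorem molien_weyl_invariants_spec : Claim_equal_molien_weyl_invariants := by
  intro lie_type rank p_max _hdom hpre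
  obtain ⟨hlt, hpm⟩ := hpre
  unfold Spec_molien_weyl_invariants molien_weyl_invariants molien_weyl_invariants_alt
  subst hlt
  dsimp only
  set ds : List Int := (if ("A" : String) == "A" && rank == 1 then [(2 : Int)]
      else if ("A" : String) == "A" && rank == 2 then [2, 3]
      else if ("A" : String) == "A" then PySem.List.pyRange 2 (rank + 2) 1
      else []) with hdsdef
  have hdeg : ∀ d ∈ ds, 2 ≤ d := by
    intro d hd
    rw [hdsdef] at hd
    by_cases h1 : rank = 1
    · simp [h1] at hd; omega
    · by_cases h2 : rank = 2
      · simp [h2] at hd; rcases hd with h | h <;> omega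
      · simp [h1, h2, PySem.List.mem_pyRange_one] at hd; omega
  -- facts about w = max(ds, default=1)
  have hw : ∀ d ∈ ds, d ≤ PySem.List.maxD ds (fun x => x) 1 := by
    cases ds with
    | nil => intro d hd; exact absurd hd (List.not_mem_nil)
    | cons x t =>
      intro d hd
      rw [PySem.List.maxD, PySem.List.max?_id_cons, Option.getD_some]
      rcases List.mem_cons.mp hd with h | h
      · subst h; exact (PySem.List.le_foldl_max t d).1
      · exact (PySem.List.le_foldl_max t x).2 d h
  have hw1 : 1 ≤ PySem.List.maxD ds (fun x => x) 1 := by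
    cases hds : ds with
    | nil => rw [PySem.List.maxD, PySem.List.max?]; simp
    | cons x t =>
      have hx : 2 ≤ x := hdeg x (by rw [hds]; simp)
      rw [PySem.List.maxD, PySem.List.max?_id_cons, Option.getD_some]
      have := (PySem.List.le_foldl_max t x).1
      omega
  have hN : ((p_max + 1).toNat : Int) = p_max + 1 := by omega
  have hsweep := sweepB ds hdeg (PySem.List.maxD ds (fun x => x) 1) hw1 hw (p_max + 1).toNat
  rw [hN] at hsweep
  rw [hsweep]
  rw [init_eq p_max hpm, foldA p_max hpm ds hdeg]
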